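-- pv_equiv track=rewrite | github.com/pjz987/advent-of-code-2019 | day02/day02-2.py | lists_of_four
-- ===== SOURCE A (Python) =====
-- def lists_of_four(intcode_list):
--     intcode_fours = []
--     slice1 = 0
--     slice2 = 4
--     while len(intcode_fours) < (len(intcode_list) / 4):
--         intcode_fours.append(intcode_list[ slice1 : slice2 ])
--         slice1 = slice2
--         slice2 += 4
--     return intcode_fours
-- ===== SOURCE B (Python) =====
-- def lists_of_four(intcode_list):
--     result = []
--     buf = []
--     for x in intcode_list:
--         buf.append(x)
--         if len(buf) == 4:
--             result.append(buf)
--             buf = []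
--     if buf:
--         result.append(buf)
--     return result
-- ===== Notes on version B (the rewrite author's own statement) =====
-- stated objective: simpler
-- what changed: Replaces the while-loop that slices at multiples of four (guarded by a float comparison len(fours) < len(list)/4) with a single pass over the elements that fills a 4-element buffer and flushes it, appending the trailing partial buffer.
import Mathlib
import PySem

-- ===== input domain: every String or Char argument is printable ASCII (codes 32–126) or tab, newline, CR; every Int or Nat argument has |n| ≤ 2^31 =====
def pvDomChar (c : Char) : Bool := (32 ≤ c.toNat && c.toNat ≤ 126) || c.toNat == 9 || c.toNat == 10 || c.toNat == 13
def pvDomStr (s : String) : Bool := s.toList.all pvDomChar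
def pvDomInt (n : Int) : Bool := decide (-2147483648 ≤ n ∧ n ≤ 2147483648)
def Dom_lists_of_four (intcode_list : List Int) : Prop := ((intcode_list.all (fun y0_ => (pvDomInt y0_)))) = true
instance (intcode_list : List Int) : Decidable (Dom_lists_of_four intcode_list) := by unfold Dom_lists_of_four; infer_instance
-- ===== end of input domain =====

-- B replaces A's slicing while-loop (float-division guard) by a single pass that fills and
-- flushes a 4-element buffer; objective: simpler, same return value on every input.

-- ===== PORT A =====
-- A's while loop: condition 'len(intcode_fours) < len(intcode_list) / 4' is an exact float
-- comparison of an int against n/4, equivalent to 4 * len(intcode_fours) < len(intcode_list)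
-- (the lengths here are far below 2^53, so the float division is exact enough for this
-- integer-vs-quarter comparison: count < n/4 ↔ 4*count < n holds for all naturals).
def lofLoop (l : List Int) (fours : List (List Int)) (s1 s2 : Nat) : List (List Int) :=
  if 4 * fours.length < l.length then
    lofLoop l (fours ++ [PySem.List.slice l (some (s1 : Int)) (some (s2 : Int))]) s2 (s2 + 4)
  else fours
termination_by l.length - 4 * fours.length
decreasing_by simp; omega

def lists_of_four (intcode_list : List Int) : List (List Int) :=
  lofLoop intcode_list [] 0 4

-- ===== PORT B =====
def lofStep (st : List (List Int) × List Int) (x : Int) : List (List Int) × List Int :=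
  let buf := st.2 ++ [x]
  if buf.length = 4 then (st.1 ++ [buf], []) else (st.1, buf)

def lists_of_four_alt (intcode_list : List Int) : List (List Int) :=
  let st := intcode_list.foldl lofStep ([], [])
  if st.2 = [] then st.1 else st.1 ++ [st.2]

-- ===== PRECONDITION & SPEC =====
def Spec_lists_of_four (intcode_list : List Int) (out : List (List Int)) : Prop := out = lists_of_four_alt intcode_list
instance (intcode_list : List Int) (out : List (List Int)) : Decidable (Spec_lists_of_four intcode_list out) := by unfold Spec_lists_of_four; infer_instance

-- ===== CLAIM (what is proved, stated in full; the proofs are below) =====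
def Claim_equal_lists_of_four : Prop := ∀ (intcode_list : List Int), Dom_lists_of_four intcode_list → Spec_lists_of_four intcode_list (lists_of_four intcode_list)

-- ===== LEMMAS AND PROOFS =====

-- proof helper: the common reference chunking
def chunk4 : List Int → List (List Int)
  | [] => []
  | x :: xs => ((x :: xs).take 4) :: chunk4 ((x :: xs).drop 4)
termination_by l => l.length
decreasing_by simp

theorem chunk4_nil : chunk4 [] = [] := by rw [chunk4]

theorem chunk4_ne_nil (l : List Int) (h : l ≠ []) :
    chunk4 l = l.take 4 :: chunk4 (l.drop 4) := by
  cases l with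
  | nil => exact absurd rfl h
  | cons x xs => rw [chunk4]

theorem lofLoop_eq (l : List Int) (n : Nat) :
    ∀ (fours : List (List Int)) (i : Nat), l.length - 4 * i ≤ n → fours.length = i →
      lofLoop l fours (4 * i) (4 * i + 4) = fours ++ chunk4 (l.drop (4 * i)) := by
  induction n with
  | zero =>
    intro fours i hle hlen
    subst hlen
    rw [lofLoop, if_neg (by omega)]
    have hd : l.drop (4 * fours.length) = [] := List.drop_eq_nil_of_le (by omega)
    rw [hd, chunk4_nil]
    exact (List.append_nil fours).symm
  | succ n ih =>
    intro fours i hle hlen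
    rw [lofLoop]
    by_cases h : 4 * i < l.length
    · have h4 : (4 * i : Nat) + (4 : Nat) = 4 * i + 4 := rfl
      rw [if_pos (by omega)]
      have hs : PySem.List.slice l (some ((4 * i : Nat) : Int)) (some ((4 * i + 4 : Nat) : Int))
          = (l.drop (4 * i)).take 4 := by
        rw [PySem.List.slice_natCast]
        congr 1
        omega
      rw [hs]
      have hrec := ih (fours ++ [(l.drop (4 * i)).take 4]) (i + 1) (by omega)
        (by simp [hlen])
      rw [show 4 * (i + 1) = 4 * i + 4 from by omega] at hrec
      rw [hrec]
      rw [chunk4_ne_nil (l.drop (4 * i)) (by simp; omega)]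
      simp [List.drop_drop]
    · rw [if_neg (by omega)]
      have hd : l.drop (4 * i) = [] := List.drop_eq_nil_of_le (by omega)
      rw [hd, chunk4_nil]
      exact (List.append_nil fours).symm

theorem foldl_lofStep_eq (rest : List Int) :
    ∀ (res : List (List Int)) (buf : List Int), buf.length < 4 →
      (if (List.foldl lofStep (res, buf) rest).2 = []
        then (List.foldl lofStep (res, buf) rest).1
        else (List.foldl lofStep (res, buf) rest).1 ++ [(List.foldl lofStep (res, buf) rest).2])
      = res ++ chunk4 (buf ++ rest) := by
  induction rest with
  | nil =>
    intro res buf hb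
    simp only [List.foldl_nil, List.append_nil]
    by_cases h : buf = []
    · simp [h, chunk4_nil]
    · rw [if_neg h, chunk4_ne_nil buf h]
      have ht : buf.take 4 = buf := List.take_of_length_le (by omega)
      have hd : buf.drop 4 = [] := List.drop_eq_nil_of_le (by omega)
      rw [ht, hd, chunk4_nil]
  | cons x xs ih =>
    intro res buf hb
    simp only [List.foldl_cons]
    by_cases h3 : buf.length = 3
    · have hstep : lofStep (res, buf) x = (res ++ [buf ++ [x]], []) := by
        simp [lofStep, h3]
      rw [hstep, ih (res ++ [buf ++ [x]]) [] (by simp)]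
      rw [chunk4_ne_nil (buf ++ x :: xs) (by simp)]
      have hbx : buf ++ x :: xs = (buf ++ [x]) ++ xs := by simp
      have hlen4 : (buf ++ [x]).length = 4 := by simp [h3]
      have ht : (buf ++ x :: xs).take 4 = buf ++ [x] := by
        rw [hbx, ← hlen4, List.take_left]
      have hd : (buf ++ x :: xs).drop 4 = xs := by
        rw [hbx, ← hlen4, List.drop_left]
      rw [ht, hd]
      simp
    · have hstep : lofStep (res, buf) x = (res, buf ++ [x]) := by
        simp [lofStep]
        intro hc
        exact absurd (by omega : buf.length = 3) h3
      rw [hstep, ih res (buf ++ [x]) (by simp; omega)]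
      simp

-- ===== VERDICT (by name: the statement is the Claim_ definition above) =====
theorem lists_of_four_spec : Claim_equal_lists_of_four := by
  intro l _
  unfold Spec_lists_of_four lists_of_four lists_of_four_alt
  have hA := lofLoop_eq l l.length [] 0 (by omega) rfl
  simp only [Nat.mul_zero, Nat.zero_add, List.drop_zero, List.nil_append] at hA
  have hB := foldl_lofStep_eq l [] [] (by simp)
  simp only [List.nil_append] at hB
  rw [hA]
  exact hB.symm
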